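-- pv_equiv track=rewrite | github.com/pg1992/advent-of-code | 2015/11/python/solution.py | satisfies_req_3
-- ===== SOURCE A (Python) =====
-- def satisfies_req_3(s):
--     """String conatains 2 or more non-overlapping pairs of equal chars.
--
--     >>> satisfies_req_3('aaa')
--     False
--     >>> satisfies_req_3('aaaa')
--     True
--     >>> satisfies_req_3('aabbaa')
--     True
--     """
--
--     i = 0
--     count = 0
--     while i < len(s) - 1:
--         if s[i] == s[i + 1]:
--             i += 1
--             count += 1
--         i += 1
--
--     return count > 1
-- ===== SOURCE B (Python) =====
-- from itertools import groupby
--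
-- def satisfies_req_3(s):
--     """String contains 2 or more non-overlapping pairs of equal chars."""
--     return sum(len(list(g)) // 2 for _, g in groupby(s)) >= 2
-- ===== Notes on version B (the rewrite author's own statement) =====
-- stated objective: idiomatic
-- what changed: Replaces the explicit index loop with greedy skip-by-2 by run-length grouping via itertools.groupby, summing len(run)//2 over maximal runs of equal characters.
import Mathlib
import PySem

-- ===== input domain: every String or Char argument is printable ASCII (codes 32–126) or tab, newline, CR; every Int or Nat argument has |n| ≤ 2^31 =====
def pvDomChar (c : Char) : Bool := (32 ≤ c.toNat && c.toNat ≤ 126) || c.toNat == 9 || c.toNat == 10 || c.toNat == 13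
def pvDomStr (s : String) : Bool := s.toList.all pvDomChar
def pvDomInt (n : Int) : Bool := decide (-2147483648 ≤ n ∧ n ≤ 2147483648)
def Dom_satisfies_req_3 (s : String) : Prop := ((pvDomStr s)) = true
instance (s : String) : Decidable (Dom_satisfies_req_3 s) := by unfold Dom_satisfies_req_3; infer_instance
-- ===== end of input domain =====

-- B replaces A's index loop (greedy skip-by-2 pairing) with run-length grouping:
-- sum of (run length / 2) over maximal runs of equal characters, compared with 2.


-- ===== PORT A =====
-- A's while loop over index i with count; i advances by 2 on a matched pair, else by 1.
def aLoop (cs : List Char) (i count : Nat) : Nat :=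
  if h : i + 1 < cs.length then
    if cs[i]'(by omega) = cs[i+1]'h then aLoop cs (i + 2) (count + 1)
    else aLoop cs (i + 1) count
  else count
termination_by cs.length - i

def satisfies_req_3 (s : String) : Bool :=
  aLoop s.toList 0 0 > 1

-- ===== PORT B =====
-- run-length encoding of the string (port of itertools.groupby: each maximal run
-- of equal adjacent characters becomes one (char, length) group, in order)
def pvRuns : List Char → List (Char × Nat)
  | [] => []
  | a :: t =>
    match pvRuns t with
    | (b, n) :: r => if a = b then (a, n + 1) :: r else (a, 1) :: (b, n) :: r
    | [] => [(a, 1)]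

def satisfies_req_3_alt (s : String) : Bool :=
  decide (2 ≤ ((pvRuns s.toList).map (fun p => p.2 / 2)).sum)

-- ===== PRECONDITION & SPEC =====
def Spec_satisfies_req_3 (s : String) (out : Bool) : Prop := out = satisfies_req_3_alt s
instance (s : String) (out : Bool) : Decidable (Spec_satisfies_req_3 s out) := by unfold Spec_satisfies_req_3; infer_instance

-- ===== CLAIM (what is proved, stated in full; the proofs are below) =====
def Claim_equal_satisfies_req_3 : Prop := ∀ (s : String), Dom_satisfies_req_3 s → Spec_satisfies_req_3 s (satisfies_req_3 s)

-- ===== LEMMAS AND PROOFS =====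

-- A's greedy pairing written as a recursion on the list of characters
def cnt : List Char → Nat
  | [] => 0
  | [_] => 0
  | a :: b :: t => if a = b then 1 + cnt t else cnt (b :: t)

-- one-step unfolding of pvRuns on a cons cell
theorem pvRuns_cons_eq (a : Char) (t : List Char) :
    pvRuns (a :: t) = (match pvRuns t with
      | (b, n) :: r => if a = b then (a, n + 1) :: r else (a, 1) :: (b, n) :: r
      | [] => [(a, 1)]) := rfl

-- the head run of pvRuns (x :: t) carries character x
theorem pvRuns_cons (x : Char) (t : List Char) :
    ∃ n r, pvRuns (x :: t) = (x, n) :: r := by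
  rw [pvRuns_cons_eq]
  rcases pvRuns t with _ | ⟨⟨b, n⟩, r⟩
  · exact ⟨1, [], rfl⟩
  · by_cases hx : x = b
    · subst hx; exact ⟨n + 1, r, by simp⟩
    · exact ⟨1, (b, n) :: r, by simp [hx]⟩

def sumRuns (l : List Char) : Nat := ((pvRuns l).map (fun p => p.2 / 2)).sum

theorem sumRuns_pair (a : Char) (t : List Char) :
    sumRuns (a :: a :: t) = 1 + sumRuns t := by
  rcases h : pvRuns t with _ | ⟨⟨b, n⟩, r⟩
  · have h1 : pvRuns (a :: t) = [(a, 1)] := by rw [pvRuns_cons_eq, h]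
    have h2 : pvRuns (a :: a :: t) = [(a, 2)] := by rw [pvRuns_cons_eq, h1]; simp
    simp [sumRuns, h2, h]
  · by_cases hab : a = b
    · subst hab
      have h1 : pvRuns (a :: t) = (a, n + 1) :: r := by rw [pvRuns_cons_eq, h]; simp
      have h2 : pvRuns (a :: a :: t) = (a, n + 2) :: r := by rw [pvRuns_cons_eq, h1]; simp
      simp [sumRuns, h2, h]; omega
    · have h1 : pvRuns (a :: t) = (a, 1) :: (b, n) :: r := by
        rw [pvRuns_cons_eq, h]; simp [hab]
      have h2 : pvRuns (a :: a :: t) = (a, 2) :: (b, n) :: r := by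
        rw [pvRuns_cons_eq, h1]; simp
      simp [sumRuns, h2, h]

theorem sumRuns_ne (a b : Char) (t : List Char) (hab : a ≠ b) :
    sumRuns (a :: b :: t) = sumRuns (b :: t) := by
  obtain ⟨n, r, h⟩ := pvRuns_cons b t
  have h2 : pvRuns (a :: b :: t) = (a, 1) :: pvRuns (b :: t) := by
    rw [pvRuns_cons_eq, h]; simp [hab]
  simp [sumRuns, h2]

theorem cnt_eq_sumRuns (l : List Char) : cnt l = sumRuns l := by
  induction l using cnt.induct with
  | case1 => simp [cnt, sumRuns, pvRuns]
  | case2 a => simp [cnt, sumRuns, pvRuns]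
  | case3 b t ih => rw [cnt, if_pos rfl, sumRuns_pair, ih]
  | case4 a b t hab ih => rw [cnt, if_neg hab, sumRuns_ne a b t hab, ih]

-- A's index loop computes count + greedy pairing of the suffix from i
theorem aLoop_eq (cs : List Char) (i count : Nat) :
    aLoop cs i count = count + cnt (cs.drop i) := by
  induction i, count using aLoop.induct cs with
  | case1 i count h heq ih =>
    rw [aLoop, dif_pos h, if_pos heq, ih]
    have h1 : i < cs.length := by omega
    rw [List.drop_eq_getElem_cons h1, List.drop_eq_getElem_cons h]
    rw [cnt, if_pos heq, show i + 1 + 1 = i + 2 from rfl]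
    omega
  | case2 i count h heq ih =>
    rw [aLoop, dif_pos h, if_neg heq, ih]
    have h1 : i < cs.length := by omega
    rw [List.drop_eq_getElem_cons h1, List.drop_eq_getElem_cons h]
    rw [cnt, if_neg heq]
  | case3 i count h =>
    rw [aLoop, dif_neg h]
    have : cnt (cs.drop i) = 0 := by
      rcases hd : cs.drop i with _ | ⟨x, _ | ⟨y, t⟩⟩
      · rfl
      · rfl
      · exfalso
        have := List.length_drop (l := cs) (i := i)
        rw [hd] at this
        simp at this
        omega
    omega

-- ===== VERDICT (by name: the statement is the Claim_ definition above) =====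
theorem satisfies_req_3_spec : Claim_equal_satisfies_req_3 := by
  intro s _
  show satisfies_req_3 s = satisfies_req_3_alt s
  simp only [satisfies_req_3, satisfies_req_3_alt, aLoop_eq, List.drop_zero,
    cnt_eq_sumRuns, sumRuns]
  simp only [Nat.zero_add]
  by_cases h : 2 ≤ ((pvRuns s.toList).map (fun p => p.2 / 2)).sum
  · simp [h]; omega
  · simp [h]; omega
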